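-- pv_equiv track=rewrite | github.com/iamez/slomix | proximity/parser/parser.py | _is_in_combat
-- ===== SOURCE A (Python) =====
-- def _is_in_combat(intervals: list[tuple[int, int]], time_ms: int) -> bool:
--     if not intervals:
--         return False
--     left = 0
--     right = len(intervals) - 1
--     while left <= right:
--         mid = (left + right) // 2
--         start, end = intervals[mid]
--         if time_ms < start:
--             right = mid - 1
--             continue
--         if time_ms > end:
--             left = mid + 1
--             continue
--         return True
--     return False
-- ===== SOURCE B (Python) =====
-- def _is_in_combat(intervals: list[tuple[int, int]], time_ms: int) -> bool:
--     # Recurse on ever-smaller list slices instead of index bookkeeping: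
--     # the probed element xs[(len(xs)-1)//2] of the current slice is exactly
--     # the element A's (left,right) loop probes, so the result is identical.
--     def go(xs: list[tuple[int, int]]) -> bool:
--         if not xs:
--             return False
--         m = (len(xs) - 1) // 2
--         start, end = xs[m]
--         if time_ms < start:
--             return go(xs[:m])
--         if time_ms > end:
--             return go(xs[m + 1:])
--         return True
--     return go(intervals)
-- ===== Notes on version B (the rewrite author's own statement) =====
-- stated objective: alternative
-- what changed: The iterative two-endpoint (left, right) index loop is replaced by structural recursion on list slices: the helper keeps no indices at all and recurses on xs[:m] or xs[m+1:], probing the same element sequence.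
import Mathlib
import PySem

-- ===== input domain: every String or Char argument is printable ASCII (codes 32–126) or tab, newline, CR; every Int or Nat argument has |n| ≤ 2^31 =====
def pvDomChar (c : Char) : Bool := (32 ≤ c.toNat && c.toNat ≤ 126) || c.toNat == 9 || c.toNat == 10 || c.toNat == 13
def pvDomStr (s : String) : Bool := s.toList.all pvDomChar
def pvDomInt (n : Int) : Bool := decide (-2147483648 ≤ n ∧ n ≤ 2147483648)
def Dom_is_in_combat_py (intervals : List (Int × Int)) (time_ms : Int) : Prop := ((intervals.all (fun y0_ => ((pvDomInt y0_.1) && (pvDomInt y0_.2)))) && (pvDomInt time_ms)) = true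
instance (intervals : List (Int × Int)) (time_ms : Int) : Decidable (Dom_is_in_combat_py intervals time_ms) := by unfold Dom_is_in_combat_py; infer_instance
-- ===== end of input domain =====

-- B replaces the iterative (left, right) index loop by structural recursion on list
-- slices (no indices kept at all): a different decomposition with the same result.

-- ===== PORT A =====
-- A's while loop, state (left, right); `fuel` is only a totality device (the window
-- shrinks each iteration, so the fuel supplied below never runs out), and the `none`
-- branch is unreachable (the loop only probes in-range indices; Python never raises here)
def is_in_combat_loop (intervals : List (Int × Int)) (time_ms : Int) : Nat → Int → Int → Bool
  | 0, _, _ => false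
  | fuel + 1, left, right =>
    if left ≤ right then
      let mid := PySem.Int.floordiv (left + right) 2
      match PySem.List.pyGet? intervals mid with
      | none => false
      | some (s, e) =>
        if time_ms < s then is_in_combat_loop intervals time_ms fuel left (mid - 1)
        else if time_ms > e then is_in_combat_loop intervals time_ms fuel (mid + 1) right
        else true
    else false

def is_in_combat_py (intervals : List (Int × Int)) (time_ms : Int) : Bool :=
  if intervals.isEmpty then false
  else is_in_combat_loop intervals time_ms (intervals.length + 1) 0 ((intervals.length : Int) - 1)

-- ===== PORT B =====
-- B's helper `go`, recursion on the slice; `fuel` is only a totality device (each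
-- recursive call strictly shortens the slice, so the fuel supplied below never runs
-- out), and the `none` branch is unreachable (m = (len-1)/2 < len on a nonempty list)
def is_in_combat_go (time_ms : Int) : Nat → List (Int × Int) → Bool
  | 0, _ => false
  | fuel + 1, xs =>
    if xs.isEmpty then false
    else
      let m := xs.length - 1
      let m := m / 2
      match xs[m]? with
      | none => false
      | some (s, e) =>
        if time_ms < s then is_in_combat_go time_ms fuel (PySem.List.slice xs none (some (m : Int)))
        else if time_ms > e then is_in_combat_go time_ms fuel (PySem.List.slice xs (some ((m : Int) + 1)) none)
        else true

def is_in_combat_py_alt (intervals : List (Int × Int)) (time_ms : Int) : Bool :=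
  is_in_combat_go time_ms intervals.length intervals

-- ===== PRECONDITION & SPEC =====
def Spec_is_in_combat_py (intervals : List (Int × Int)) (time_ms : Int) (out : Bool) : Prop := out = is_in_combat_py_alt intervals time_ms
instance (intervals : List (Int × Int)) (time_ms : Int) (out : Bool) : Decidable (Spec_is_in_combat_py intervals time_ms out) := by unfold Spec_is_in_combat_py; infer_instance

-- ===== CLAIM (what is proved, stated in full; the proofs are below) =====
def Claim_equal_is_in_combat_py : Prop := ∀ (intervals : List (Int × Int)) (time_ms : Int), Dom_is_in_combat_py intervals time_ms → Spec_is_in_combat_py intervals time_ms (is_in_combat_py intervals time_ms)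

-- ===== LEMMAS AND PROOFS =====

-- A's (left, right) window [lo, lo+n-1] corresponds to B's slice (intervals.drop lo).take n;
-- both probe the element at absolute index lo + (n-1)/2, and n bounds A's fuel.
theorem loop_eq_go (intervals : List (Int × Int)) (time_ms : Int) :
    ∀ n fa fb lo : Nat, n ≤ fa → n ≤ fb → lo + n ≤ intervals.length →
      is_in_combat_loop intervals time_ms fa (lo : Int) ((lo : Int) + (n : Int) - 1)
        = is_in_combat_go time_ms fb ((intervals.drop lo).take n) := by
  intro n
  induction n using Nat.strong_induction_on with
  | _ n ih =>
    intro fa fb lo hfa hfb hlen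
    have hys : ((intervals.drop lo).take n).length = n := by
      simp only [List.length_take, List.length_drop]; omega
    by_cases hn : n = 0
    · subst hn
      have hA : is_in_combat_loop intervals time_ms fa (lo : Int) ((lo : Int) + (0 : Nat) - 1) = false := by
        cases fa with
        | zero => rfl
        | succ fa =>
          simp only [is_in_combat_loop]
          rw [if_neg (by push_cast; omega)]
      have hB : is_in_combat_go time_ms fb ((intervals.drop lo).take 0) = false := by
        cases fb with
        | zero => rfl
        | succ fb => simp [is_in_combat_go]
      rw [hA, hB]
    · have he : ((intervals.drop lo).take n).isEmpty = false := by
        rw [List.isEmpty_eq_false_iff_exists_mem]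
        have : 0 < ((intervals.drop lo).take n).length := by omega
        exact ⟨_, List.getElem_mem this⟩
      cases fa with
      | zero => omega
      | succ fa =>
      cases fb with
      | zero => omega
      | succ fb =>
        simp only [is_in_combat_loop, is_in_combat_go]
        rw [if_pos (by omega : (lo : Int) ≤ (lo : Int) + (n : Int) - 1)]
        rw [if_neg (by simp [he])]
        have hk : (n - 1) / 2 < n := by omega
        have hmid : PySem.Int.floordiv ((lo : Int) + ((lo : Int) + (n : Int) - 1)) 2
            = ((lo + (n - 1) / 2 : Nat) : Int) := by
          rw [PySem.Int.floordiv_eq_iff_of_pos (by omega)]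
          push_cast
          omega
        have hget : ((intervals.drop lo).take n)[(((intervals.drop lo).take n).length - 1) / 2]?
            = PySem.List.pyGet? intervals ((lo + (n - 1) / 2 : Nat) : Int) := by
          rw [PySem.List.pyGet?_natCast, hys, List.getElem?_take_of_lt hk, List.getElem?_drop]
        rw [hmid]
        rw [← hget]
        cases hg : ((intervals.drop lo).take n)[(((intervals.drop lo).take n).length - 1) / 2]? with
        | none => rfl
        | some p =>
          obtain ⟨s, e⟩ := p
          simp only [hys]
          by_cases h1 : time_ms < s
          · rw [if_pos h1, if_pos h1]
            have harg : ((lo + (n - 1) / 2 : Nat) : Int) - 1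
                = (lo : Int) + (((n - 1) / 2 : Nat) : Int) - 1 := by push_cast; ring
            rw [harg, PySem.List.slice_to_natCast, List.take_take,
              min_eq_left (le_of_lt hk)]
            exact ih ((n - 1) / 2) hk fa fb lo (by omega) (by omega) (by omega)
          · rw [if_neg h1, if_neg h1]
            by_cases h2 : time_ms > e
            · rw [if_pos h2, if_pos h2]
              have h3 : (((n - 1) / 2 : Nat) : Int) + 1 = (((n - 1) / 2 + 1 : Nat) : Int) := by
                push_cast; ring
              rw [h3, PySem.List.slice_from_natCast, List.drop_take, List.drop_drop]
              have harg : (lo : Int) + (n : Int) - 1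
                  = ((lo + (n - 1) / 2 + 1 : Nat) : Int) + ((n - ((n - 1) / 2 + 1) : Nat) : Int) - 1 := by
                push_cast; omega
              have harg2 : ((lo + (n - 1) / 2 : Nat) : Int) + 1
                  = ((lo + (n - 1) / 2 + 1 : Nat) : Int) := by push_cast; ring
              have harg3 : lo + ((n - 1) / 2 + 1) = lo + (n - 1) / 2 + 1 := by omega
              rw [harg, harg2, harg3]
              exact ih (n - ((n - 1) / 2 + 1)) (by omega) fa fb (lo + (n - 1) / 2 + 1)
                (by omega) (by omega) (by omega)
            · rw [if_neg h2, if_neg h2]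

-- ===== VERDICT (by name: the statement is the Claim_ definition above) =====
theorem is_in_combat_py_spec : Claim_equal_is_in_combat_py := by
  intro intervals time_ms _
  unfold Spec_is_in_combat_py is_in_combat_py is_in_combat_py_alt
  by_cases he : intervals.isEmpty
  · have h0 : intervals.length = 0 := by simpa [List.isEmpty_iff_length_eq_zero] using he
    rw [if_pos he, h0]
    rfl
  · rw [if_neg he]
    have := loop_eq_go intervals time_ms intervals.length (intervals.length + 1)
      intervals.length 0 (by omega) (by omega) (by omega)
    simpa using this
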